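-- pv_equiv track=rewrite | github.com/hckr/adventofcode | 2017/Python/3.py | get_cell_pos
-- ===== SOURCE A (Python) =====
-- import math
-- from enum import Enum
--
-- class Direction(Enum):
--     LEFT = 0
--     UP = 1
--     RIGHT = 2
--     DOWN = 3
--     LAST = 4
--
-- def get_cell_pos(cell):
--     a = math.ceil(math.sqrt(cell))
--     if a % 2 == 0:
--         a += 1
--
--     diff = a**2 - cell
--
--     origin_x = origin_y = int((a - 1) / 2)
--     x = a - 1
--     y = a - 1
--
--     d = Direction(Direction.LEFT)
--     while diff > 0:
--         if diff >= a:
--             c = a - 1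
--         else:
--             c = diff
--         if d == Direction.LEFT:
--             x -= c
--         elif d == Direction.UP:
--             y -= c
--         elif d == Direction.RIGHT:
--             x += c
--         elif d == Direction.DOWN:
--             y += c
--         diff -= c
--         d = Direction(d.value + 1)
--
--     return x - origin_x, y - origin_y
-- ===== SOURCE B (Python) =====
-- import math
--
-- def get_cell_pos(cell):
--     a = math.ceil(math.sqrt(cell))
--     if a % 2 == 0:
--         a += 1
--     diff = a * a - cell
--     o = (a - 1) // 2
--     if diff == 0:
--         return a - 1 - o, a - 1 - o
--     side, rem = divmod(diff, a - 1)
--     x, y = [(a - 1 - rem, a - 1), (0, a - 1 - rem), (rem, 0), (a - 1, rem)][side]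
--     return x - o, y - o
-- ===== Notes on version B (the rewrite author's own statement) =====
-- stated objective: simpler
-- what changed: A walks the ring from the corner through the four directions with a state-machine loop; B computes the ring side and offset in closed form with one divmod and maps side to coordinates directly.
-- outside the precondition, e.g. on get_cell_pos(0): A raises ValueError, B raises ZeroDivisionError
import Mathlib
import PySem

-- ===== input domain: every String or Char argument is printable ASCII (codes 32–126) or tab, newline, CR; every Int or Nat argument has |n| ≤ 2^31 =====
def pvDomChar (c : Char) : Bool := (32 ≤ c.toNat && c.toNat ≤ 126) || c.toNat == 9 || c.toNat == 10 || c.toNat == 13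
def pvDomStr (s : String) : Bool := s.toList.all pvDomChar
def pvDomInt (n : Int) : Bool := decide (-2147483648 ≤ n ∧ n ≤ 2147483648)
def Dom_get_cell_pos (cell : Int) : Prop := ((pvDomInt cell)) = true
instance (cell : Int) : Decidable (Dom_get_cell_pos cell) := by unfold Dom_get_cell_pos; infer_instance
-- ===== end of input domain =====

-- B replaces A's four-direction walking loop by a closed-form side/offset computation (objective: simpler).

-- ===== PORT A =====
-- ceil(math.sqrt(cell)) for cell ≥ 0, ported by hand via Nat.sqrt: exact on Dom, where
-- math.sqrt is correctly rounded and cannot cross an integer (perfect squares are exact,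
-- and for non-squares the true root is farther than one ulp from any integer).
def pyCeilSqrtA (cell : Int) : Int :=
  let r : Int := (Nat.sqrt cell.toNat : Int)
  if r * r = cell then r else r + 1

-- the while loop of A; d is the Direction's .value (0..4). Fuel 5 only makes the
-- recursion total: inside Pre_ the loop runs at most 4 iterations and then diff = 0.
def spiralWalk (a : Int) : Nat → Int → Int → Int → Nat → Int × Int
  | 0, _, x, y, _ => (x, y)
  | fuel + 1, diff, x, y, d =>
    if diff > 0 then
      let c := if diff ≥ a then a - 1 else diff
      if d = 0 then spiralWalk a fuel (diff - c) (x - c) y (d + 1)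
      else if d = 1 then spiralWalk a fuel (diff - c) x (y - c) (d + 1)
      else if d = 2 then spiralWalk a fuel (diff - c) (x + c) y (d + 1)
      else if d = 3 then spiralWalk a fuel (diff - c) x (y + c) (d + 1)
      else spiralWalk a fuel (diff - c) x y (d + 1)
    else (x, y)

def get_cell_pos (cell : Int) : Int × Int :=
  let a0 := pyCeilSqrtA cell
  let a := if PySem.Int.mod a0 2 = 0 then a0 + 1 else a0
  let diff := a ^ 2 - cell
  -- int((a - 1) / 2): float true division then truncation toward zero; exact on Dom
  let origin := PySem.Int.truncdiv (a - 1) 2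
  let p := spiralWalk a 5 diff (a - 1) (a - 1) 0
  (p.1 - origin, p.2 - origin)

-- ===== PORT B =====
-- same ceil(math.sqrt(cell)) expression as in Source B (see comment on pyCeilSqrtA)
def pyCeilSqrtB (cell : Int) : Int :=
  let r : Int := (Nat.sqrt cell.toNat : Int)
  if r * r = cell then r else r + 1

def get_cell_pos_alt (cell : Int) : Int × Int :=
  let a0 := pyCeilSqrtB cell
  let a := if PySem.Int.mod a0 2 = 0 then a0 + 1 else a0
  let diff := a * a - cell
  let o := PySem.Int.floordiv (a - 1) 2
  if diff = 0 then (a - 1 - o, a - 1 - o)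
  else
    let side := PySem.Int.floordiv diff (a - 1)
    let rem := PySem.Int.mod diff (a - 1)
    -- literal list indexing [..][side]; side ∈ {0,1,2,3} inside Pre_, so no IndexError
    let p := (PySem.List.pyGet? [(a - 1 - rem, a - 1), (0, a - 1 - rem), (rem, 0), (a - 1, rem)] side).getD (0, 0)
    (p.1 - o, p.2 - o)

-- ===== PRECONDITION & SPEC =====
-- Pre_ excludes cell ≤ 0: math.sqrt raises ValueError for cell < 0, and for cell = 0
-- A raises ValueError too (every step subtracts c = 0, so d runs past the last
-- Direction value); B raises ZeroDivisionError there (divmod by a side of zero).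
def Pre_get_cell_pos (cell : Int) : Prop := 1 ≤ cell
instance (cell : Int) : Decidable (Pre_get_cell_pos cell) := by unfold Pre_get_cell_pos; infer_instance
def pvWitness_get_cell_pos : Int := (10)

def Spec_get_cell_pos (cell : Int) (out : Int × Int) : Prop := out = get_cell_pos_alt cell
instance (cell : Int) (out : Int × Int) : Decidable (Spec_get_cell_pos cell out) := by unfold Spec_get_cell_pos; infer_instance

-- ===== CLAIM (what is proved, stated in full; the proofs are below) =====
def Claim_equal_get_cell_pos : Prop := ∀ (cell : Int), Dom_get_cell_pos cell → Pre_get_cell_pos cell → Spec_get_cell_pos cell (get_cell_pos cell)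

-- ===== LEMMAS AND PROOFS =====

-- int(x / 2) agrees with x // 2 for nonnegative x
lemma truncdiv_eq_floordiv_two (x : Int) (h : 0 ≤ x) :
    PySem.Int.truncdiv x 2 = PySem.Int.floordiv x 2 := by
  unfold PySem.Int.truncdiv PySem.Int.floordiv
  rw [Int.tdiv_eq_ediv_of_nonneg h, Int.fdiv_eq_ediv]
  simp

-- ceil(sqrt(cell)) is the least a0 with cell ≤ a0², and it is positive
lemma ceilSqrt_bounds (cell : Int) (h : 1 ≤ cell) :
    (pyCeilSqrtA cell - 1) * (pyCeilSqrtA cell - 1) < cell ∧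
    cell ≤ pyCeilSqrtA cell * pyCeilSqrtA cell ∧ 1 ≤ pyCeilSqrtA cell := by
  have hcast : ((cell.toNat : Int)) = cell := Int.toNat_of_nonneg (by omega)
  have h1 : (Nat.sqrt cell.toNat : Int) * (Nat.sqrt cell.toNat : Int) ≤ cell := by
    rw [← hcast]; exact_mod_cast Nat.sqrt_le cell.toNat
  have h2 : cell < ((Nat.sqrt cell.toNat : Int) + 1) * ((Nat.sqrt cell.toNat : Int) + 1) := by
    rw [← hcast]; exact_mod_cast Nat.lt_succ_sqrt cell.toNat
  have hr0 : (0:Int) ≤ (Nat.sqrt cell.toNat : Int) := Int.natCast_nonneg _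
  have hdef : pyCeilSqrtA cell =
      if (Nat.sqrt cell.toNat : Int) * (Nat.sqrt cell.toNat : Int) = cell
      then (Nat.sqrt cell.toNat : Int) else (Nat.sqrt cell.toNat : Int) + 1 := rfl
  rw [hdef]
  set r : Int := (Nat.sqrt cell.toNat : Int) with hrdef
  split_ifs with hx
  · have hr1 : (1:Int) ≤ r := by nlinarith
    exact ⟨by nlinarith, le_of_eq hx.symm, hr1⟩
  · exact ⟨by rw [show r + 1 - 1 = r from by ring]; exact lt_of_le_of_ne h1 hx,
      le_of_lt h2, by linarith⟩

-- single loop iterations, one lemma per direction value, plus the stop case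
lemma spiralWalk_stop (a : Int) (f : Nat) (diff x y : Int) (d : Nat) (h : ¬ diff > 0) :
    spiralWalk a (f + 1) diff x y d = (x, y) := by
  simp [spiralWalk, h]

lemma spiralWalk_d0 (a : Int) (f : Nat) (diff x y : Int) (h : diff > 0) :
    spiralWalk a (f + 1) diff x y 0 =
      spiralWalk a f (diff - (if diff ≥ a then a - 1 else diff)) (x - (if diff ≥ a then a - 1 else diff)) y 1 := by
  simp [spiralWalk, h]

lemma spiralWalk_d1 (a : Int) (f : Nat) (diff x y : Int) (h : diff > 0) :
    spiralWalk a (f + 1) diff x y 1 =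
      spiralWalk a f (diff - (if diff ≥ a then a - 1 else diff)) x (y - (if diff ≥ a then a - 1 else diff)) 2 := by
  simp [spiralWalk, h]

lemma spiralWalk_d2 (a : Int) (f : Nat) (diff x y : Int) (h : diff > 0) :
    spiralWalk a (f + 1) diff x y 2 =
      spiralWalk a f (diff - (if diff ≥ a then a - 1 else diff)) (x + (if diff ≥ a then a - 1 else diff)) y 3 := by
  simp [spiralWalk, h]

lemma spiralWalk_d3 (a : Int) (f : Nat) (diff x y : Int) (h : diff > 0) :
    spiralWalk a (f + 1) diff x y 3 =
      spiralWalk a f (diff - (if diff ≥ a then a - 1 else diff)) x (y + (if diff ≥ a then a - 1 else diff)) 4 := by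
  simp [spiralWalk, h]

-- the walk from the corner, in closed form
lemma walk_closed (a diff : Int) (h0 : 0 < diff) (h4 : diff < 4 * (a - 1)) :
    spiralWalk a 5 diff (a - 1) (a - 1) 0 =
      if diff ≤ a - 1 then (a - 1 - diff, a - 1)
      else if diff ≤ 2 * (a - 1) then (0, a - 1 - (diff - (a - 1)))
      else if diff ≤ 3 * (a - 1) then (diff - 2 * (a - 1), 0)
      else (a - 1, diff - 3 * (a - 1)) := by
  by_cases h1 : diff ≤ a - 1
  · rw [show (5 : Nat) = 4 + 1 from rfl, spiralWalk_d0 a 4 diff (a - 1) (a - 1) h0,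
      if_neg (show ¬ diff ≥ a by omega),
      show diff - diff = 0 from by ring,
      show (4 : Nat) = 3 + 1 from rfl,
      spiralWalk_stop a 3 0 (a - 1 - diff) (a - 1) 1 (by omega),
      if_pos h1]
  · by_cases h2 : diff ≤ 2 * (a - 1)
    · rw [show (5 : Nat) = 4 + 1 from rfl, spiralWalk_d0 a 4 diff (a - 1) (a - 1) h0,
        if_pos (show diff ≥ a by omega),
        show (4 : Nat) = 3 + 1 from rfl,
        spiralWalk_d1 a 3 (diff - (a - 1)) (a - 1 - (a - 1)) (a - 1) (by omega),
        if_neg (show ¬ diff - (a - 1) ≥ a by omega),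
        show diff - (a - 1) - (diff - (a - 1)) = 0 from by ring,
        show (3 : Nat) = 2 + 1 from rfl,
        spiralWalk_stop a 2 0 (a - 1 - (a - 1)) (a - 1 - (diff - (a - 1))) 2 (by omega),
        if_neg h1, if_pos h2, Prod.mk.injEq]
      exact ⟨by omega, by omega⟩
    · by_cases h3 : diff ≤ 3 * (a - 1)
      · rw [show (5 : Nat) = 4 + 1 from rfl, spiralWalk_d0 a 4 diff (a - 1) (a - 1) h0,
          if_pos (show diff ≥ a by omega),
          show (4 : Nat) = 3 + 1 from rfl,
          spiralWalk_d1 a 3 (diff - (a - 1)) (a - 1 - (a - 1)) (a - 1) (by omega),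
          if_pos (show diff - (a - 1) ≥ a by omega),
          show (3 : Nat) = 2 + 1 from rfl,
          spiralWalk_d2 a 2 (diff - (a - 1) - (a - 1)) (a - 1 - (a - 1)) (a - 1 - (a - 1)) (by omega),
          if_neg (show ¬ diff - (a - 1) - (a - 1) ≥ a by omega),
          show diff - (a - 1) - (a - 1) - (diff - (a - 1) - (a - 1)) = 0 from by ring,
          show (2 : Nat) = 1 + 1 from rfl,
          spiralWalk_stop a 1 0 (a - 1 - (a - 1) + (diff - (a - 1) - (a - 1))) (a - 1 - (a - 1)) 3 (by omega),
          if_neg h1, if_neg h2, if_pos h3, Prod.mk.injEq]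
        exact ⟨by omega, by omega⟩
      · rw [show (5 : Nat) = 4 + 1 from rfl, spiralWalk_d0 a 4 diff (a - 1) (a - 1) h0,
          if_pos (show diff ≥ a by omega),
          show (4 : Nat) = 3 + 1 from rfl,
          spiralWalk_d1 a 3 (diff - (a - 1)) (a - 1 - (a - 1)) (a - 1) (by omega),
          if_pos (show diff - (a - 1) ≥ a by omega),
          show (3 : Nat) = 2 + 1 from rfl,
          spiralWalk_d2 a 2 (diff - (a - 1) - (a - 1)) (a - 1 - (a - 1)) (a - 1 - (a - 1)) (by omega),
          if_pos (show diff - (a - 1) - (a - 1) ≥ a by omega),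
          show (2 : Nat) = 1 + 1 from rfl,
          spiralWalk_d3 a 1 (diff - (a - 1) - (a - 1) - (a - 1)) (a - 1 - (a - 1) + (a - 1)) (a - 1 - (a - 1)) (by omega),
          if_neg (show ¬ diff - (a - 1) - (a - 1) - (a - 1) ≥ a by omega),
          show diff - (a - 1) - (a - 1) - (a - 1) - (diff - (a - 1) - (a - 1) - (a - 1)) = 0 from by ring,
          show (1 : Nat) = 0 + 1 from rfl,
          spiralWalk_stop a 0 0 (a - 1 - (a - 1) + (a - 1)) (a - 1 - (a - 1) + (diff - (a - 1) - (a - 1) - (a - 1))) 4 (by omega),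
          if_neg h1, if_neg h2, if_neg h3, Prod.mk.injEq]
        exact ⟨by omega, by omega⟩

-- for diff > 0 the two result expressions agree (a is the bumped odd side ≥ 3)
lemma agree_pos (a diff : Int) (ha : 3 ≤ a) (h0 : 0 < diff) (h4 : diff < 4 * (a - 1)) :
    ((spiralWalk a 5 diff (a - 1) (a - 1) 0).1 - PySem.Int.truncdiv (a - 1) 2,
     (spiralWalk a 5 diff (a - 1) (a - 1) 0).2 - PySem.Int.truncdiv (a - 1) 2) =
    (((PySem.List.pyGet? [(a - 1 - PySem.Int.mod diff (a - 1), a - 1),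
        (0, a - 1 - PySem.Int.mod diff (a - 1)),
        (PySem.Int.mod diff (a - 1), 0),
        (a - 1, PySem.Int.mod diff (a - 1))] (PySem.Int.floordiv diff (a - 1))).getD (0, 0)).1
       - PySem.Int.floordiv (a - 1) 2,
     ((PySem.List.pyGet? [(a - 1 - PySem.Int.mod diff (a - 1), a - 1),
        (0, a - 1 - PySem.Int.mod diff (a - 1)),
        (PySem.Int.mod diff (a - 1), 0),
        (a - 1, PySem.Int.mod diff (a - 1))] (PySem.Int.floordiv diff (a - 1))).getD (0, 0)).2
       - PySem.Int.floordiv (a - 1) 2) := by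
  rw [truncdiv_eq_floordiv_two _ (by omega), walk_closed a diff h0 h4,
    PySem.Int.floordiv_eq_ediv_of_pos (show (0:Int) < a - 1 by omega),
    PySem.Int.mod_eq_emod_of_pos (show (0:Int) < a - 1 by omega)]
  have hq : (a - 1) * (diff / (a - 1)) + diff % (a - 1) = diff := Int.mul_ediv_add_emod diff (a - 1)
  have hr0 : 0 ≤ diff % (a - 1) := Int.emod_nonneg diff (by omega)
  have hr1 : diff % (a - 1) < a - 1 := Int.emod_lt_of_pos diff (by omega)
  have hq0 : 0 ≤ diff / (a - 1) := Int.ediv_nonneg (by omega) (by omega)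
  have hq4 : diff / (a - 1) < 4 := by
    rw [Int.ediv_lt_iff_lt_mul (by omega)]; omega
  have hqv : diff / (a - 1) = 0 ∨ diff / (a - 1) = 1 ∨ diff / (a - 1) = 2 ∨ diff / (a - 1) = 3 := by omega
  rcases hqv with h | h | h | h <;> rw [h] at hq ⊢ <;>
    simp only [show ∀ p q r s : Int × Int, (PySem.List.pyGet? [p,q,r,s] 0).getD (0,0) = p from fun _ _ _ _ => rfl,
      show ∀ p q r s : Int × Int, (PySem.List.pyGet? [p,q,r,s] 1).getD (0,0) = q from fun _ _ _ _ => rfl,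
      show ∀ p q r s : Int × Int, (PySem.List.pyGet? [p,q,r,s] 2).getD (0,0) = r from fun _ _ _ _ => rfl,
      show ∀ p q r s : Int × Int, (PySem.List.pyGet? [p,q,r,s] 3).getD (0,0) = s from fun _ _ _ _ => rfl] <;>
    split_ifs <;> (rw [Prod.mk.injEq]; exact ⟨by omega, by omega⟩)

-- ===== VERDICT (by name: the statement is the Claim_ definition above) =====
theorem get_cell_pos_spec : Claim_equal_get_cell_pos := by
  intro cell _ hpre
  unfold Pre_get_cell_pos at hpre
  unfold Spec_get_cell_pos
  obtain ⟨hb1, hb2, hb3⟩ := ceilSqrt_bounds cell hpre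
  simp only [get_cell_pos, get_cell_pos_alt,
    show pyCeilSqrtB cell = pyCeilSqrtA cell from rfl]
  set a0 := pyCeilSqrtA cell with ha0def
  rw [PySem.Int.mod_eq_emod_of_pos (show (0:Int) < 2 by norm_num)]
  by_cases hpar : a0 % 2 = 0
  -- a = a0 + 1 (ceil(sqrt) was even, bumped)
  · rw [if_pos hpar, show (a0 + 1) ^ 2 = (a0 + 1) * (a0 + 1) from by ring]
    have ha3 : 3 ≤ a0 + 1 := by omega
    have hd0 : 0 < (a0 + 1) * (a0 + 1) - cell := by nlinarith
    have hd4 : (a0 + 1) * (a0 + 1) - cell < 4 * (a0 + 1 - 1) := by nlinarith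
    rw [if_neg (show ¬ ((a0 + 1) * (a0 + 1) - cell = 0) from by
      intro h; rw [h] at hd0; exact lt_irrefl 0 hd0)]
    exact agree_pos (a0 + 1) ((a0 + 1) * (a0 + 1) - cell) ha3 hd0 hd4
  -- a = a0 (already odd)
  · rw [if_neg hpar, show (a0 : Int) ^ 2 = a0 * a0 from by ring]
    rcases eq_or_lt_of_le hb3 with h1 | h1
    -- degenerate smallest ring: the centre cell itself, both sides are literal here
    · rw [← h1] at hb2 ⊢
      have hc1 : cell = 1 := by omega
      rw [hc1]
      decide
    · have ha3 : 3 ≤ a0 := by omega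
      by_cases hz : a0 * a0 - cell = 0
      · rw [if_pos hz, hz, show (5 : Nat) = 4 + 1 from rfl,
          spiralWalk_stop a0 4 0 (a0 - 1) (a0 - 1) 0 (by omega),
          truncdiv_eq_floordiv_two _ (by omega)]
      · have hd0 : 0 < a0 * a0 - cell :=
          lt_of_le_of_ne (by linarith) (Ne.symm hz)
        have hd4 : a0 * a0 - cell < 4 * (a0 - 1) := by nlinarith
        rw [if_neg hz]
        exact agree_pos a0 (a0 * a0 - cell) ha3 hd0 hd4
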